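-- pv_equiv track=rewrite | github.com/mlo31415/Wanted_Pages_Enumerator | WikidotHelpers/WikidotHelpers.py | CannonicizeString
-- ===== SOURCE A (Python) =====
-- def CannonicizeString(name):
--     out = []
--     inAlpha = False
--     inJunk = False
--     for c in name:
--         if c.isalnum() or c == ':':     # ":", the category separator, is an honorary alphanumeric
--             if inJunk:
--                 out.append("-")
--             out.append(c)
--             inJunk = False
--             inAlpha = True
--         else:
--             inJunk = True
--             inAlpha = False
--     return ''.join(out)
-- ===== SOURCE B (Python) =====
-- from itertools import groupby
--
--
-- def CannonicizeString(name):
--     groups = [(kept, ''.join(run))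
--               for kept, run in groupby(name, key=lambda c: c.isalnum() or c == ':')]
--     out = []
--     for i, (kept, run) in enumerate(groups):
--         if kept:
--             out.append(run)
--         elif i != len(groups) - 1:
--             out.append('-')
--     return ''.join(out)
-- ===== Notes on version B (the rewrite author's own statement) =====
-- stated objective: alternative
-- what changed: Replaces A's character-by-character state machine (inJunk/inAlpha flags) by splitting the string once into maximal runs of kept vs junk characters (itertools.groupby) and then emitting each kept run whole and one dash per junk run unless it is the final run.
import Mathlib
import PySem

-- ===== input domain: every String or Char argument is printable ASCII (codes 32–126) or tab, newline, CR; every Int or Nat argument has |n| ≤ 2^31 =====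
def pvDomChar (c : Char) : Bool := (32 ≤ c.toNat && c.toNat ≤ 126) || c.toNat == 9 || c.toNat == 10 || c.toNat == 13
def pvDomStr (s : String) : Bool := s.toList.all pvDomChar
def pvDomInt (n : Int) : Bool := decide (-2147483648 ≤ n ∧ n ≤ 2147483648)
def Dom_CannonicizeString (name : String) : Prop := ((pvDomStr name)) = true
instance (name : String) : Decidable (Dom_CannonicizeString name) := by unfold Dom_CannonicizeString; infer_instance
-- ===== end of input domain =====

-- B replaces A's per-character flag machine by a run-splitting (groupby) pass: alternative decomposition, same cost.

-- ===== PORT A =====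
-- c.isalnum() or c == ':'
def pvKeepA (c : Char) : Bool := PySem.Chars.isalnum c || c == ':'

-- literal port of A's loop: state (out, inAlpha, inJunk); appends are one character each
def CannonicizeString (name : String) : String :=
  let st := name.toList.foldl
    (fun (st : List Char × Bool × Bool) c =>
      if pvKeepA c then
        ((st.1 ++ (if st.2.2 then ['-'] else [])) ++ [c], true, false)
      else
        (st.1, false, true))
    ([], false, false)
  String.ofList st.1

-- ===== PORT B =====
def pvKeepB (c : Char) : Bool := PySem.Chars.isalnum c || c == ':'

-- itertools.groupby: split into maximal runs of equal key (kept?, run characters)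
def pvRuns (l : List Char) : List (Bool × List Char) :=
  match l with
  | [] => []
  | c :: cs =>
    let k := pvKeepB c
    (k, c :: cs.takeWhile (fun d => pvKeepB d == k)) ::
      pvRuns (cs.dropWhile (fun d => pvKeepB d == k))
termination_by l.length
decreasing_by
  simp only [List.length_cons]
  exact Nat.lt_succ_of_le (List.length_dropWhile_le _ _)

-- B's emit loop: a kept run is copied, a junk run yields '-' unless it is the last group
def pvEmit : List (Bool × List Char) → List Char
  | [] => []
  | (k, g) :: rest =>
    (if k then g else if rest.isEmpty then [] else ['-']) ++ pvEmit rest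

def CannonicizeString_alt (name : String) : String :=
  String.ofList (pvEmit (pvRuns name.toList))

-- ===== PRECONDITION & SPEC =====
def Spec_CannonicizeString (name : String) (out : String) : Prop := out = CannonicizeString_alt name
instance (name : String) (out : String) : Decidable (Spec_CannonicizeString name out) := by unfold Spec_CannonicizeString; infer_instance

-- ===== CLAIM (what is proved, stated in full; the proofs are below) =====
def Claim_equal_CannonicizeString : Prop := ∀ (name : String), Dom_CannonicizeString name → Spec_CannonicizeString name (CannonicizeString name)

-- ===== LEMMAS AND PROOFS =====

-- A's loop as a structural recursion over the remaining input and the inJunk flag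
def pvACore : List Char → Bool → List Char
  | [], _ => []
  | c :: cs, j =>
    if pvKeepA c then (if j then '-' :: c :: pvACore cs false else c :: pvACore cs false)
    else pvACore cs true

theorem pvFoldA (l : List Char) : ∀ (out : List Char) (a j : Bool),
    (l.foldl
      (fun (st : List Char × Bool × Bool) c =>
        if pvKeepA c then ((st.1 ++ (if st.2.2 then ['-'] else [])) ++ [c], true, false)
        else (st.1, false, true))
      (out, a, j)).1 = out ++ pvACore l j := by
  induction l with
  | nil => intro out a j; simp [pvACore]
  | cons c cs ih =>
    intro out a j
    rw [List.foldl_cons]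
    by_cases hk : pvKeepA c = true
    · by_cases hj : j = true
      · simp only [hk, hj, if_true]
        rw [ih]
        simp [pvACore, hk]
      · simp only [Bool.not_eq_true] at hj
        simp only [hk, hj, if_true, Bool.false_eq_true, if_false]
        rw [ih]
        simp [pvACore, hk]
    · simp only [Bool.not_eq_true] at hk
      simp only [hk, Bool.false_eq_true, if_false]
      rw [ih]
      simp [pvACore, hk]

theorem pvACore_kept_run (g : List Char) (rest : List Char)
    (hg : ∀ c ∈ g, pvKeepA c = true) :
    pvACore (g ++ rest) false = g ++ pvACore rest false := by
  induction g with
  | nil => simp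
  | cons c cs ih =>
    have hc := hg c (by simp)
    simp [pvACore, hc, ih (fun d hd => hg d (by simp [hd]))]

theorem pvACore_junk_run (g : List Char) (rest : List Char)
    (hg : ∀ c ∈ g, pvKeepA c = false) :
    pvACore (g ++ rest) true = pvACore rest true := by
  induction g with
  | nil => simp
  | cons c cs ih =>
    have hc := hg c (by simp)
    simp [pvACore, hc, ih (fun d hd => hg d (by simp [hd]))]

def pvHeadKeep : List Char → Bool
  | [] => false
  | c :: _ => pvKeepA c

theorem pvHead_dropWhile {p : Char → Bool} {cs : List Char} {d : Char} {ds : List Char}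
    (h : cs.dropWhile p = d :: ds) : p d = false := by
  induction cs with
  | nil => simp [List.dropWhile] at h
  | cons c cs ih =>
    rw [List.dropWhile_cons] at h
    by_cases hc : p c = true
    · exact ih (by simpa [hc] using h)
    · simp at hc
      simp [hc] at h
      rw [← h.1]; exact hc

-- main bridge: A's state machine equals B's run-based emit (dash prefix iff entering with inJunk set and a kept head)
theorem pvMain (n : Nat) : ∀ l : List Char, l.length ≤ n → ∀ j : Bool,
    pvACore l j = (if j && pvHeadKeep l then ['-'] else []) ++ pvEmit (pvRuns l) := by
  induction n with
  | zero =>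
    intro l hl j
    have : l = [] := List.length_eq_zero_iff.mp (Nat.le_zero.mp hl)
    subst this
    simp [pvACore, pvRuns, pvEmit, pvHeadKeep]
  | succ n ih =>
    intro l hl j
    match l with
    | [] => simp [pvACore, pvRuns, pvEmit, pvHeadKeep]
    | c :: cs =>
      have hcs : cs.length ≤ n := by simpa using hl
      set k := pvKeepB c with hk
      set g := cs.takeWhile (fun d => pvKeepB d == k) with hg
      set rest := cs.dropWhile (fun d => pvKeepB d == k) with hrest
      have hsplit : cs = g ++ rest := (List.takeWhile_append_dropWhile).symm
      have hrl : rest.length ≤ n :=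
        le_trans (by rw [hrest]; exact List.length_dropWhile_le _ _) hcs
      have hgmem : ∀ d ∈ g, pvKeepB d = k := by
        intro d hd
        have := List.mem_takeWhile_imp (hg ▸ hd)
        simpa using this
      have hkeq : pvKeepA = pvKeepB := rfl
      have hprun : pvRuns (c :: cs) = (k, c :: g) :: pvRuns rest := by
        rw [pvRuns]
      have hirest := ih rest hrl
      by_cases hkc : k = true
      · -- kept run
        have hcA : pvKeepA c = true := by rw [hkeq, ← hk]; exact hkc
        have hrunA : pvACore (g ++ rest) false = g ++ pvACore rest false := by
          apply pvACore_kept_run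
          intro d hd; rw [hkeq, hgmem d hd]; exact hkc
        have hrest0 := hirest false
        simp only [Bool.false_and, Bool.false_eq_true, if_false, List.nil_append] at hrest0
        have : pvACore (c :: cs) j =
            (if j then ['-'] else []) ++ c :: (g ++ pvEmit (pvRuns rest)) := by
          rw [pvACore]
          rw [if_pos hcA, hsplit, hrunA, hrest0]
          cases j <;> simp
        rw [this, hprun, pvEmit, if_pos hkc]
        have : pvHeadKeep (c :: cs) = true := by simpa [pvHeadKeep] using hcA
        rw [this]
        cases j <;> simp
      · -- junk run
        have hkf : k = false := by simpa using hkc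
        have hcA : pvKeepA c = false := by rw [hkeq, ← hk]; exact hkf
        have hrunA : pvACore (g ++ rest) true = pvACore rest true := by
          apply pvACore_junk_run
          intro d hd; rw [hkeq, hgmem d hd]; exact hkf
        have hstep : pvACore (c :: cs) j = pvACore rest true := by
          rw [pvACore, if_neg (by simp [hcA]), hsplit, hrunA]
        have hhk : pvHeadKeep (c :: cs) = false := by simpa [pvHeadKeep] using hcA
        have hbridge : (if pvHeadKeep rest then ['-'] else ([] : List Char)) =
            if (pvRuns rest).isEmpty then [] else ['-'] := by
          cases hre : rest with
          | nil => simp [pvHeadKeep, pvRuns]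
          | cons d ds =>
            have hdw : cs.dropWhile (fun d => pvKeepB d == k) = d :: ds := by
              rw [← hrest]; exact hre
            have hd : pvKeepB d = true := by
              have := pvHead_dropWhile hdw
              simpa [hkf] using this
            have h1 : pvHeadKeep (d :: ds) = true := by
              simpa [pvHeadKeep, hkeq] using hd
            rw [h1, pvRuns]
            simp
        rw [hstep, hirest true, hprun, pvEmit, hhk]
        simp only [Bool.true_and, hkf, Bool.false_eq_true, if_false, Bool.and_false]
        rw [hbridge]
        simp

-- ===== VERDICT (by name: the statement is the Claim_ definition above) =====
theorem CannonicizeString_spec : Claim_equal_CannonicizeString := by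
  intro name _
  unfold Spec_CannonicizeString CannonicizeString CannonicizeString_alt
  have h1 := pvFoldA name.toList [] false false
  simp only [List.nil_append] at h1
  have h2 := pvMain name.toList.length name.toList le_rfl false
  simp only [Bool.false_and, Bool.false_eq_true, if_false, List.nil_append] at h2
  simp only [h1, h2]
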